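-- pv_equiv track=rewrite | github.com/mhadifilms/dvr | dvr/diff.py | _list_key
-- ===== SOURCE A (Python) =====
-- from typing import TYPE_CHECKING, Any
--
-- def _list_key(left: list[Any], right: list[Any]) -> str | None:
--     candidates = ("name", "id", "shot_id", "frame", "index")
--     if not left and not right:
--         return None
--     samples = (left[:1] + right[:1])[:2]
--     for candidate in candidates:
--         if all(isinstance(s, dict) and candidate in s for s in samples):
--             return candidate
--     return None
-- ===== SOURCE B (Python) =====
-- def _list_key(left, right):
--     candidates = ("name", "id", "shot_id", "frame", "index")
--     if not left and not right:
--         return None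
--     samples = (left[:1] + right[:1])[:2]
--     common = None
--     for s in samples:
--         if not isinstance(s, dict):
--             return None
--         keys = set(s)
--         common = keys if common is None else common & keys
--     for candidate in candidates:
--         if candidate in common:
--             return candidate
--     return None
-- ===== Notes on version B (the rewrite author's own statement) =====
-- stated objective: alternative
-- what changed: Instead of testing every candidate against every sample with all(...), B computes the intersection of the samples' key sets once and then picks the first candidate found in it.
import Mathlib
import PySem

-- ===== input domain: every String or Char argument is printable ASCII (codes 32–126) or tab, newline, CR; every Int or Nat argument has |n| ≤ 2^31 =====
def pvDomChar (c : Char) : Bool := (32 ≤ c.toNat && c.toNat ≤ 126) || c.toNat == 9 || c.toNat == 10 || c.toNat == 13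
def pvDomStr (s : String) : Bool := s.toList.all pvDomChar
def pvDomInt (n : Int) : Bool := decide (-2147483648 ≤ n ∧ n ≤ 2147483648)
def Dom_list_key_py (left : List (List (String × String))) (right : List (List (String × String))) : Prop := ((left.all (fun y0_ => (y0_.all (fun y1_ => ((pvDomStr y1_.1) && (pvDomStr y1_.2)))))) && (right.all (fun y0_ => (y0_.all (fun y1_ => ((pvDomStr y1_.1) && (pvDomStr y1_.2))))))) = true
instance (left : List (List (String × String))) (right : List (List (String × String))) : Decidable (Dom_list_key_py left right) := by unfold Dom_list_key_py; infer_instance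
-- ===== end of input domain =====

-- B replaces A's per-candidate scan of all samples by one intersection of the samples' key sets,
-- then picks the first candidate in that intersection (objective: alternative, same cost).

-- ===== PORT A =====
-- Literal port of A: guard, samples = (left[:1] + right[:1])[:2], then the for-loop with early
-- return is List.find? over the candidate tuple; 'candidate in s' is first-match key membership.
def list_key_py (left : List (List (String × String))) (right : List (List (String × String))) : Option String :=
  if left.isEmpty && right.isEmpty then none
  else
    let samples := (left.take 1 ++ right.take 1).take 2
    ["name", "id", "shot_id", "frame", "index"].find?
      (fun cand => samples.all (fun s => s.any (fun kv => kv.1 == cand)))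

-- ===== PORT B =====
-- Port of Source B: fold the samples into Option of the running key-set intersection (set(s) over a
-- dict iterates its keys), then find the first candidate contained in it.  The isinstance guard
-- of Source B is vacuous under the type convention (every sample is a dict) and has no Lean image.
def list_key_py_alt (left : List (List (String × String))) (right : List (List (String × String))) : Option String :=
  if left.isEmpty && right.isEmpty then none
  else
    let samples := (left.take 1 ++ right.take 1).take 2
    let common : Option (PySem.Set String) := samples.foldl
      (fun acc s =>
        let keys := PySem.Set.ofList (s.map Prod.fst)
        match acc with
        | none => some keys
        | some c => some (PySem.Set.inter c keys)) none
    match common with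
    | none => none
    | some c => ["name", "id", "shot_id", "frame", "index"].find? (fun cand => PySem.Set.contains c cand)

-- ===== PRECONDITION & SPEC =====
def Spec_list_key_py (left : List (List (String × String))) (right : List (List (String × String))) (out : Option String) : Prop := out = list_key_py_alt left right
instance (left : List (List (String × String))) (right : List (List (String × String))) (out : Option String) : Decidable (Spec_list_key_py left right out) := by unfold Spec_list_key_py; infer_instance

-- ===== CLAIM (what is proved, stated in full; the proofs are below) =====
def Claim_equal_list_key_py : Prop := ∀ (left : List (List (String × String))) (right : List (List (String × String))), Dom_list_key_py left right → Spec_list_key_py left right (list_key_py left right)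

-- ===== LEMMAS AND PROOFS =====

theorem pv_find?_ext {α : Type} (p q : α → Bool) (l : List α) (h : ∀ a, p a = q a) :
    l.find? p = l.find? q := by
  induction l with
  | nil => rfl
  | cons x xs ih => simp [List.find?, h x, ih]

theorem pv_key_one (x : List (String × String)) (c : String) :
    x.any (fun kv => kv.1 == c) =
      PySem.Set.contains (PySem.Set.ofList (x.map Prod.fst)) c := by
  rw [Bool.eq_iff_iff]
  simp [PySem.Set.mem_ofList, List.any_eq_true, List.mem_map]

theorem pv_key_two (x y : List (String × String)) (c : String) :
    (x.any (fun kv => kv.1 == c) && (y.any (fun kv => kv.1 == c) && true)) =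
      PySem.Set.contains
        (PySem.Set.inter (PySem.Set.ofList (x.map Prod.fst)) (PySem.Set.ofList (y.map Prod.fst))) c := by
  rw [Bool.eq_iff_iff]
  simp [PySem.Set.mem_inter, PySem.Set.mem_ofList, List.any_eq_true, List.mem_map]

-- ===== VERDICT (by name: the statement is the Claim_ definition above) =====
theorem list_key_py_spec : Claim_equal_list_key_py := by
  intro left right _
  unfold Spec_list_key_py list_key_py list_key_py_alt
  cases left with
  | nil =>
    cases right with
    | nil => rfl
    | cons y ys =>
      simp only [List.isEmpty_nil, List.isEmpty_cons, Bool.and_false, if_neg Bool.false_ne_true,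
        List.take, List.nil_append, List.foldl, List.all]
      exact pv_find?_ext _ _ _ (fun c => by simpa using pv_key_one y c)
  | cons x xs =>
    cases right with
    | nil =>
      simp only [List.isEmpty_cons, Bool.false_and, if_neg Bool.false_ne_true,
        List.take, List.append_nil, List.foldl, List.all]
      exact pv_find?_ext _ _ _ (fun c => by simpa using pv_key_one x c)
    | cons y ys =>
      simp only [List.isEmpty_cons, Bool.false_and, if_neg Bool.false_ne_true,
        List.take, List.cons_append, List.nil_append, List.foldl, List.all]
      exact pv_find?_ext _ _ _ (fun c => by simpa using pv_key_two x y c)
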